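-- pv_equiv track=rewrite | github.com/khawlanoman/EXAM_3 | ft_string_sculpor.py | ft_string_sculptor
-- ===== SOURCE A (Python) =====
-- def ft_string_sculptor(string):
--     k = 1
--     out_put = ""
--     for i in string:
--         if i.isalpha():
--             if k % 2 == 0:
--                 out_put += i.upper()
--             else:
--                 out_put += i.lower()
--         else:
--             out_put += i
--             k = 1
--         k +=1
--     return out_put
-- ===== SOURCE B (Python) =====
-- def ft_string_sculptor(string):
--     # Run-based: split into maximal alpha / non-alpha runs; non-alpha runs are
--     # copied verbatim; an alpha run alternates case, starting lower only for
--     # the very first run of the string, upper for every later alpha run.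
--     out = []
--     i = 0
--     n = len(string)
--     first = True
--     while i < n:
--         j = i
--         if string[i].isalpha():
--             while j < n and string[j].isalpha():
--                 j += 1
--             start_upper = not first
--             out.append(''.join(
--                 c.upper() if ((k % 2 == 0) == start_upper) else c.lower()
--                 for k, c in enumerate(string[i:j])))
--         else:
--             while j < n and not string[j].isalpha():
--                 j += 1
--             out.append(string[i:j])
--         first = False
--         i = j
--     return ''.join(out)
-- ===== Notes on version B (the rewrite author's own statement) =====
-- stated objective: alternative
-- what changed: Replaced the per-character counter state machine (k reset on separators, parity checked each char) by a run decomposition: the string is split into maximal alpha/non-alpha runs, non-alpha runs are emitted verbatim, and each alpha run alternates case locally, starting lower only for the string's first run and upper for every later alpha run.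
import Mathlib
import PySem

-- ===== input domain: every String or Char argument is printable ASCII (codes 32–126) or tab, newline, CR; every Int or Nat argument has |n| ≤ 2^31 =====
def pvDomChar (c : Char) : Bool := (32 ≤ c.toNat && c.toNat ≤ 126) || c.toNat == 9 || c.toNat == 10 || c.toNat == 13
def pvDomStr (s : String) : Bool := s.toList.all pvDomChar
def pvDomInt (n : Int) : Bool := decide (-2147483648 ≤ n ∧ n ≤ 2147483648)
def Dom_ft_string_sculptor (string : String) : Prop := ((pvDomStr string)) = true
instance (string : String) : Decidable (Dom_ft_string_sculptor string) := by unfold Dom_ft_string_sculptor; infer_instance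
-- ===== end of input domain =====

-- B replaces A's per-character counter state machine by a run decomposition (maximal
-- alpha/non-alpha runs, per-run alternation); objective: alternative decomposition.

-- ===== PORT A =====
-- the for-loop over the characters, state (k, out_put); 'k = 1' then 'k += 1' gives 1+1
def pvA_loop : List Char → Int → List Char → List Char
  | [], _, out => out
  | c :: cs, k, out =>
    if PySem.Chars.isalpha c then
      if PySem.Int.mod k 2 = 0 then pvA_loop cs (k + 1) (out ++ [PySem.Chars.upperChar c])
      else pvA_loop cs (k + 1) (out ++ [PySem.Chars.lowerChar c])
    else pvA_loop cs (1 + 1) (out ++ [c])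

def ft_string_sculptor (string : String) : String :=
  String.mk (pvA_loop string.toList 1 [])

-- ===== PORT B =====
-- inner scan 'while j < n and string[j].isalpha() == want': the run string[i:j] …
def pvB_run : List Char → Bool → List Char
  | [], _ => []
  | c :: cs, want => if PySem.Chars.isalpha c == want then c :: pvB_run cs want else []

-- … and the remainder string[j:]
def pvB_rest : List Char → Bool → List Char
  | [], _ => []
  | c :: cs, want => if PySem.Chars.isalpha c == want then pvB_rest cs want else c :: cs

-- the join over 'enumerate(string[i:j])' with the start_upper flag
def pvB_altCase : List Char → Nat → Bool → List Char
  | [], _, _ => []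
  | c :: cs, k, su =>
    (if decide (k % 2 = 0) == su then PySem.Chars.upperChar c else PySem.Chars.lowerChar c)
      :: pvB_altCase cs (k + 1) su

theorem pvB_rest_length_le (cs : List Char) (w : Bool) : (pvB_rest cs w).length ≤ cs.length := by
  induction cs with
  | nil => simp [pvB_rest]
  | cons c cs ih =>
    simp only [pvB_rest]
    split
    · exact Nat.le_succ_of_le ih
    · exact Nat.le_refl _

-- the outer while loop: one iteration emits one maximal run
def pvB_go (cs : List Char) (first : Bool) : List Char :=
  match h : cs with
  | [] => []
  | c :: cs' =>
    let want := PySem.Chars.isalpha c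
    (if want then pvB_altCase (c :: pvB_run cs' want) 0 (!first) else c :: pvB_run cs' want)
      ++ pvB_go (pvB_rest cs' want) false
termination_by cs.length
decreasing_by
  simp only [List.length_cons]
  exact Nat.lt_succ_of_le (pvB_rest_length_le cs' _)

def ft_string_sculptor_alt (string : String) : String :=
  String.mk (pvB_go string.toList true)

-- ===== PRECONDITION & SPEC =====
def Spec_ft_string_sculptor (string : String) (out : String) : Prop := out = ft_string_sculptor_alt string
instance (string : String) (out : String) : Decidable (Spec_ft_string_sculptor string out) := by unfold Spec_ft_string_sculptor; infer_instance

-- ===== CLAIM (what is proved, stated in full; the proofs are below) =====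
def Claim_equal_ft_string_sculptor : Prop := ∀ (string : String), Dom_ft_string_sculptor string → Spec_ft_string_sculptor string (ft_string_sculptor string)

-- ===== LEMMAS AND PROOFS =====

theorem pvA_loop_hom (cs : List Char) : ∀ k out,
    pvA_loop cs k out = out ++ pvA_loop cs k [] := by
  induction cs with
  | nil => intro k out; simp [pvA_loop]
  | cons c cs ih =>
    intro k out
    simp only [pvA_loop]
    split
    · split
      · rw [ih _ (out ++ _), ih _ ([] ++ _)]; simp
      · rw [ih _ (out ++ _), ih _ ([] ++ _)]; simp
    · rw [ih _ (out ++ _), ih _ ([] ++ _)]; simp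

theorem pvB_split (cs : List Char) (w : Bool) :
    pvB_run cs w ++ pvB_rest cs w = cs := by
  induction cs with
  | nil => simp [pvB_run, pvB_rest]
  | cons c cs ih =>
    simp only [pvB_run, pvB_rest]
    split <;> simp [ih]

theorem pvB_run_all (cs : List Char) (w : Bool) :
    ∀ c ∈ pvB_run cs w, PySem.Chars.isalpha c = w := by
  induction cs with
  | nil => simp [pvB_run]
  | cons c cs ih =>
    simp only [pvB_run]
    split
    · rename_i h
      intro x hx
      rcases List.mem_cons.mp hx with rfl | hx
      · exact eq_of_beq h
      · exact ih x hx
    · simp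

theorem pvB_rest_head (cs : List Char) (w : Bool) :
    ∀ d ds, pvB_rest cs w = d :: ds → PySem.Chars.isalpha d ≠ w := by
  induction cs with
  | nil => simp [pvB_rest]
  | cons c cs ih =>
    simp only [pvB_rest]
    split
    · exact ih
    · rename_i h
      intro d ds hd
      cases hd
      simpa using h

-- A's loop over a nonalpha char resets k to 2 and copies the char
theorem pvA_loop_nonalpha_cons (d : Char) (ds : List Char) (hd : PySem.Chars.isalpha d = false)
    (k : Int) (out : List Char) :
    pvA_loop (d :: ds) k out = pvA_loop ds 2 (out ++ [d]) := by
  simp [pvA_loop, hd]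

-- hence the continuation after a nonalpha head is independent of k
theorem pvA_loop_nonalpha_head (d : Char) (ds : List Char) (hd : PySem.Chars.isalpha d = false)
    (k : Int) (out : List Char) :
    pvA_loop (d :: ds) k out = out ++ pvA_loop (d :: ds) 2 [] := by
  rw [pvA_loop_nonalpha_cons d ds hd k out, pvA_loop_nonalpha_cons d ds hd 2 [],
      pvA_loop_hom ds, pvA_loop_hom ds 2 ([] ++ [d])]
  simp

-- A's loop over a run of letters equals B's per-run alternation, given the phase relation
theorem pvA_loop_alpha_run (run : List Char) :
    ∀ rest k j su out, (∀ c ∈ run, PySem.Chars.isalpha c = true) →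
    (PySem.Int.mod k 2 = 0 ↔ decide (j % 2 = 0) = su) →
    pvA_loop (run ++ rest) k out =
      pvA_loop rest (k + run.length) (out ++ pvB_altCase run j su) := by
  induction run with
  | nil => intro rest k j su out _ _; simp [pvB_altCase]
  | cons c run ih =>
    intro rest k j su out hall hph
    have hc : PySem.Chars.isalpha c = true := hall c (List.mem_cons_self ..)
    have hall' : ∀ x ∈ run, PySem.Chars.isalpha x = true :=
      fun x hx => hall x (List.mem_cons_of_mem _ hx)
    have h1 : PySem.Int.mod k 2 = k % 2 := PySem.Int.mod_eq_emod_of_pos (by omega)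
    have h2 : PySem.Int.mod (k + 1) 2 = (k + 1) % 2 := PySem.Int.mod_eq_emod_of_pos (by omega)
    have hph' : PySem.Int.mod (k + 1) 2 = 0 ↔ decide ((j + 1) % 2 = 0) = su := by
      rw [h1] at hph
      rw [h2]
      cases su <;> simp only [decide_eq_true_eq, decide_eq_false_iff_not] at hph ⊢ <;> omega
    simp only [List.cons_append, pvA_loop]
    rw [if_pos hc]
    by_cases h0 : PySem.Int.mod k 2 = 0
    · have hb : decide (j % 2 = 0) = su := hph.mp h0
      rw [if_pos h0]
      simp only [pvB_altCase, hb, BEq.rfl, if_pos rfl]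
      rw [ih rest (k + 1) (j + 1) su (out ++ [PySem.Chars.upperChar c]) hall' hph']
      congr 1
      · simp only [List.length_cons]; push_cast; ring
      · simp
    · have hb : (decide (j % 2 = 0) == su) = false := by
        cases su <;> simp_all
      rw [if_neg h0]
      simp only [pvB_altCase, hb, Bool.false_eq_true, if_neg (by simp : ¬ (false = true))]
      rw [ih rest (k + 1) (j + 1) su (out ++ [PySem.Chars.lowerChar c]) hall' hph']
      congr 1
      · simp only [List.length_cons]; push_cast; ring
      · simp

-- A's loop over a nonempty run of non-letters copies it and leaves k = 2
theorem pvA_loop_nonalpha_run (run : List Char) :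
    ∀ rest k out, run ≠ [] → (∀ c ∈ run, PySem.Chars.isalpha c = false) →
    pvA_loop (run ++ rest) k out = pvA_loop rest 2 (out ++ run) := by
  induction run with
  | nil => intro _ _ _ h; exact absurd rfl h
  | cons c run ih =>
    intro rest k out _ hall
    have hc : PySem.Chars.isalpha c = false := hall c (List.mem_cons_self ..)
    rw [List.cons_append, pvA_loop_nonalpha_cons c _ hc]
    cases run with
    | nil => simp
    | cons d ds =>
      rw [ih rest 2 (out ++ [c]) (by simp) (fun x hx => hall x (List.mem_cons_of_mem _ hx))]
      simp

theorem pv_main : ∀ n (cs : List Char), cs.length ≤ n → ∀ first : Bool,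
    pvA_loop cs (if first then 1 else 2) [] = pvB_go cs first := by
  intro n
  induction n with
  | zero =>
    intro cs hlen first
    have : cs = [] := List.eq_nil_of_length_eq_zero (Nat.le_zero.mp hlen)
    subst this
    simp [pvA_loop, pvB_go]
  | succ n ih =>
    intro cs hlen first
    cases cs with
    | nil => simp [pvA_loop, pvB_go]
    | cons c cs' =>
      rw [pvB_go]
      obtain ⟨w, hwv⟩ : ∃ w, PySem.Chars.isalpha c = w := ⟨_, rfl⟩
      simp only [hwv]
      have hsplit : (c :: pvB_run cs' w) ++ pvB_rest cs' w = c :: cs' := by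
        rw [List.cons_append, pvB_split]
      have hrestlen : (pvB_rest cs' w).length ≤ n := by
        have := pvB_rest_length_le cs' w
        simp only [List.length_cons] at hlen
        omega
      have ihrest : pvA_loop (pvB_rest cs' w) 2 [] = pvB_go (pvB_rest cs' w) false := by
        simpa using ih (pvB_rest cs' w) hrestlen false
      cases w with
      | true =>
        rw [if_pos rfl]
        have hall : ∀ x ∈ c :: pvB_run cs' true, PySem.Chars.isalpha x = true := by
          intro x hx
          rcases List.mem_cons.mp hx with rfl | hx
          · exact hwv
          · exact pvB_run_all cs' true x hx
        have hph : PySem.Int.mod (if first then 1 else 2) 2 = 0 ↔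
            decide ((0 : Nat) % 2 = 0) = !first := by
          cases first <;> decide
        have hA := pvA_loop_alpha_run (c :: pvB_run cs' true) (pvB_rest cs' true)
          (if first then 1 else 2) 0 (!first) [] hall hph
        rw [hsplit] at hA
        simp only [List.nil_append] at hA
        rw [hA]
        cases hrest : pvB_rest cs' true with
        | nil => simp [pvA_loop, pvB_go]
        | cons d ds =>
          have hd : PySem.Chars.isalpha d = false := by
            have := pvB_rest_head cs' true d ds hrest
            simpa using this
          rw [hrest] at ihrest
          rw [pvA_loop_nonalpha_head d ds hd, ihrest]
      | false =>
        rw [if_neg (by simp : ¬ (false = true))]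
        have hall : ∀ x ∈ c :: pvB_run cs' false, PySem.Chars.isalpha x = false := by
          intro x hx
          rcases List.mem_cons.mp hx with rfl | hx
          · exact hwv
          · exact pvB_run_all cs' false x hx
        have hA := pvA_loop_nonalpha_run (c :: pvB_run cs' false) (pvB_rest cs' false)
          (if first then 1 else 2) [] (by simp) hall
        rw [hsplit] at hA
        simp only [List.nil_append] at hA
        rw [hA, pvA_loop_hom, ihrest]

-- ===== VERDICT (by name: the statement is the Claim_ definition above) =====
theorem ft_string_sculptor_spec : Claim_equal_ft_string_sculptor := by
  intro s _
  unfold Spec_ft_string_sculptor ft_string_sculptor ft_string_sculptor_alt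
  exact congrArg String.mk (pv_main s.toList.length s.toList (Nat.le_refl _) true)
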